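-- pv_equiv track=rewrite | github.com/master1018/llm_daily_arxiv | source/src/utils.py | generate_html_dblp
-- ===== SOURCE A (Python) =====
-- keywords_dblp = ["large language model", "llm", "diagnosis", "incident", "cloud", "anomaly detection", "failure prediction"]
--
-- def generate_html_dblp(dblp_papers):
--     content = ""
--         # content += '<h2>{}</h2>'.format(time)
--
--     # sort by keywords
--     papers_info = []
--     map_used = [0] * len(dblp_papers)
--     for key in keywords_dblp:
--         for i in range(0, len(dblp_papers)):
--             if map_used[i] == 1:
--                 continue
--             if key in dblp_papers[i]["title"].lower():
--                 map_used[i] = 1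
--                 papers_info.append(dblp_papers[i])
--
--     for paper in papers_info:
--         title = '<h3><a href="{}" target="_blank">{}</a></h3>'.format(
--             paper["href"], paper["title"])
--
--         primary_category = '<p>Category: <b>{}</b></p>'.format(
--             paper["ConOrJouName"])
--
--         authors = '<p><b>{}</b></p>'.format(paper["authors"])
--
--         new_paper = f"{title}{authors}{primary_category}"
--
--         content += '{}<br/>'.format(new_paper)
--
--     html_content = f"<html><body>{content}</body></html>"
--     return html_content
-- ===== SOURCE B (Python) =====
-- keywords_dblp = ["large language model", "llm", "diagnosis", "incident", "cloud", "anomaly detection", "failure prediction"]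
--
-- def generate_html_dblp(dblp_papers):
--     # compute each paper's priority (index of first matching keyword) once,
--     # then emit the groups in priority order
--     keyed = []
--     for paper in dblp_papers:
--         title_lower = paper["title"].lower()
--         for j, key in enumerate(keywords_dblp):
--             if key in title_lower:
--                 keyed.append((j, paper))
--                 break
--     content = ""
--     for group in range(len(keywords_dblp)):
--         for j, paper in keyed:
--             if j == group:
--                 content += '<h3><a href="{}" target="_blank">{}</a></h3><p><b>{}</b></p><p>Category: <b>{}</b></p><br/>'.format(
--                     paper["href"], paper["title"], paper["authors"], paper["ConOrJouName"])
--     return f"<html><body>{content}</body></html>"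
-- ===== Notes on version B (the rewrite author's own statement) =====
-- stated objective: simpler
-- what changed: A repeatedly rescans the whole paper list once per keyword with a mutable used-flags array; B computes each paper's priority (index of its first matching keyword) in a single pass over the papers and then emits the priority groups in order, with no used-flags bookkeeping.
import Mathlib
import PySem

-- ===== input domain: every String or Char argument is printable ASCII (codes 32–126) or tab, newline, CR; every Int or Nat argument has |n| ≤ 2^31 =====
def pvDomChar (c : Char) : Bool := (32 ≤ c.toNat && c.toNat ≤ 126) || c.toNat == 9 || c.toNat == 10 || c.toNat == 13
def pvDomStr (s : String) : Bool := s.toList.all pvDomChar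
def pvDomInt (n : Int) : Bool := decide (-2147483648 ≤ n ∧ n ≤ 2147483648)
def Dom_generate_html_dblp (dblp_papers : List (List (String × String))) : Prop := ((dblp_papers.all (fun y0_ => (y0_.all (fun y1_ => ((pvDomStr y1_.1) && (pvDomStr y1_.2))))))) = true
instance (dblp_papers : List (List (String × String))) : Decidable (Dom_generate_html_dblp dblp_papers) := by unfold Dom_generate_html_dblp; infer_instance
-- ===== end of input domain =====

-- B computes each paper's first-matching-keyword index once and emits the groups in
-- priority order, replacing A's keyword-major rescan with used-flags (objective: simpler).
-- Equivalence is about the return value; neither program mutates its argument.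


-- ===== PORT A =====
-- module constant keywords_dblp
def pvKeywords : List String :=
  ["large language model", "llm", "diagnosis", "incident", "cloud", "anomaly detection", "failure prediction"]

-- paper[k]: dict lookup = first match in the association list; KeyError (none) is excluded by Pre_,
-- so the port reads the looked-up value with getD "" (exact on Pre_)
def pvDGet (paper : List (String × String)) (k : String) : Option String :=
  paper.lookup k

-- paper["title"].lower()
def pvTitleLower (paper : List (String × String)) : String :=
  PySem.Str.lower ((pvDGet paper "title").getD "")

-- the inner 'for i in range(0, len(dblp_papers))' loop of A, for one keyword
def pvInnerA (dblp_papers : List (List (String × String))) (key : String)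
    (st : List Int × List (List (String × String))) :
    List Int × List (List (String × String)) :=
  (PySem.List.pyRange 0 (dblp_papers.length : Int) 1).foldl (fun st i =>
    if PySem.List.pyGetD st.1 i 0 == 1 then st
    else
      if PySem.Str.isIn key (pvTitleLower (PySem.List.pyGetD dblp_papers i [])) then
        (PySem.List.pySetD st.1 i 1, st.2 ++ [PySem.List.pyGetD dblp_papers i []])
      else st) st

def generate_html_dblp (dblp_papers : List (List (String × String))) : String :=
  -- map_used = [0] * len(dblp_papers); for key in keywords_dblp: inner loop
  let st := pvKeywords.foldl (fun st key => pvInnerA dblp_papers key st)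
    (List.replicate dblp_papers.length (0 : Int), [])
  -- for paper in papers_info: content += ...
  let content := st.2.foldl (fun content paper =>
    let title := "<h3><a href=\"" ++ (pvDGet paper "href").getD "" ++ "\" target=\"_blank\">"
      ++ (pvDGet paper "title").getD "" ++ "</a></h3>"
    let primary_category := "<p>Category: <b>" ++ (pvDGet paper "ConOrJouName").getD "" ++ "</b></p>"
    let authors := "<p><b>" ++ (pvDGet paper "authors").getD "" ++ "</b></p>"
    let new_paper := title ++ authors ++ primary_category
    content ++ (new_paper ++ "<br/>")) ""
  "<html><body>" ++ content ++ "</body></html>"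

-- ===== PORT B =====
-- the inner 'for j, key in enumerate(keywords_dblp): if key in title_lower: ...; break' loop
def pvFirstMatch (titleLower : String) : List String → Int → Option Int
  | [], _ => none
  | k :: ks, j => if PySem.Str.isIn k titleLower then some j else pvFirstMatch titleLower ks (j + 1)

-- the single format string of B's content loop
def pvRender (paper : List (String × String)) : String :=
  "<h3><a href=\"" ++ (pvDGet paper "href").getD "" ++ "\" target=\"_blank\">"
    ++ (pvDGet paper "title").getD "" ++ "</a></h3><p><b>"
    ++ (pvDGet paper "authors").getD "" ++ "</b></p><p>Category: <b>"
    ++ (pvDGet paper "ConOrJouName").getD "" ++ "</b></p><br/>"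

def generate_html_dblp_alt (dblp_papers : List (List (String × String))) : String :=
  -- keyed = [(first matching keyword index, paper)] in original order
  let keyed := dblp_papers.foldl (fun keyed paper =>
    match pvFirstMatch (pvTitleLower paper) pvKeywords 0 with
    | some j => keyed ++ [(j, paper)]
    | none => keyed) []
  -- for group in range(len(keywords_dblp)): for j, paper in keyed: if j == group: content += ...
  let content := (PySem.List.pyRange 0 (pvKeywords.length : Int) 1).foldl (fun content group =>
    keyed.foldl (fun content jp =>
      if jp.1 == group then content ++ pvRender jp.2 else content) content) ""
  "<html><body>" ++ content ++ "</body></html>"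

-- ===== PRECONDITION & SPEC =====
-- Pre_ excludes exactly the KeyError inputs: a paper without a "title" key (both programs read
-- every title), or a keyword-matched paper missing "href"/"authors"/"ConOrJouName" (read when
-- the matched paper is rendered). A raises KeyError there; nothing A returns on is excluded.
def Pre_generate_html_dblp (dblp_papers : List (List (String × String))) : Prop :=
  ∀ p ∈ dblp_papers, (p.lookup "title").isSome = true ∧
    ((∃ k ∈ pvKeywords, PySem.Str.isIn k (pvTitleLower p) = true) →
      ((p.lookup "href").isSome = true ∧ (p.lookup "authors").isSome = true ∧
       (p.lookup "ConOrJouName").isSome = true))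
instance (dblp_papers : List (List (String × String))) : Decidable (Pre_generate_html_dblp dblp_papers) := by
  unfold Pre_generate_html_dblp; infer_instance

def pvWitness_generate_html_dblp : (List (List (String × String))) :=
  [[("title", "An LLM survey"), ("href", "http://x"), ("authors", "A. B."), ("ConOrJouName", "ICse")],
   [("title", "unrelated work")]]

def Spec_generate_html_dblp (dblp_papers : List (List (String × String))) (out : String) : Prop := out = generate_html_dblp_alt dblp_papers
instance (dblp_papers : List (List (String × String))) (out : String) : Decidable (Spec_generate_html_dblp dblp_papers out) := by unfold Spec_generate_html_dblp; infer_instance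

-- ===== CLAIM (what is proved, stated in full; the proofs are below) =====
def Claim_equal_generate_html_dblp : Prop := ∀ (dblp_papers : List (List (String × String))), Dom_generate_html_dblp dblp_papers → Pre_generate_html_dblp dblp_papers → Spec_generate_html_dblp dblp_papers (generate_html_dblp dblp_papers)

-- ===== LEMMAS AND PROOFS =====

-- abbreviation for "keyword key occurs in the lowered title of p"
def pvMatches (key : String) (p : List (String × String)) : Bool :=
  PySem.Str.isIn key (pvTitleLower p)

-- A's papers_info, written keyword-major over a used-predicate (value-level reformulation)
def pvSel (papers : List (List (String × String))) :
    List String → (List (String × String) → Bool) → List (List (String × String))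
  | [], _ => []
  | k :: ks, u =>
      papers.filter (fun p => !u p && pvMatches k p) ++
        pvSel papers ks (fun p => u p || pvMatches k p)

theorem pv_getD_append_length {α : Type} (l1 : List α) (a : α) (l2 : List α) (d : α) :
    (l1 ++ a :: l2).getD l1.length d = a := by
  simp [List.getD_eq_getElem?_getD]

theorem pv_set_append_length {α : Type} (l1 : List α) (a b : α) (l2 : List α) :
    (l1 ++ a :: l2).set l1.length b = l1 ++ b :: l2 := by
  induction l1 with
  | nil => rfl
  | cons x xs ih => simp [ih]

-- one inner pass of A, from position u1.length, over papers P1 ++ P2 whose used flags are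
-- u1 ++ P2.map f : it appends P2's fresh matches and updates the flags pointwise
theorem pv_innerA_go (key : String) (P2 : List (List (String × String)))
    (f : List (String × String) → Int) :
    ∀ (P1 : List (List (String × String))) (u1 : List Int), u1.length = P1.length →
    ∀ (acc : List (List (String × String))),
    (PySem.List.pyRange (u1.length : Int) ((P1 ++ P2).length : Int) 1).foldl (fun st i =>
        if PySem.List.pyGetD st.1 i 0 == 1 then st
        else
          if PySem.Str.isIn key (pvTitleLower (PySem.List.pyGetD (P1 ++ P2) i [])) then
            (PySem.List.pySetD st.1 i 1, st.2 ++ [PySem.List.pyGetD (P1 ++ P2) i []])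
          else st) (u1 ++ P2.map f, acc)
      = (u1 ++ P2.map (fun p => if f p != 1 && pvMatches key p then 1 else f p),
         acc ++ P2.filter (fun p => f p != 1 && pvMatches key p)) := by
  induction P2 with
  | nil =>
      intro P1 u1 h acc
      rw [PySem.List.pyRange_one_eq_nil (by simp [h])]
      simp
  | cons p t ih =>
      intro P1 u1 h acc
      have hlt : (u1.length : Int) < (((P1 ++ p :: t).length : Nat) : Int) := by
        simp [h]
      rw [PySem.List.pyRange_one_cons hlt, List.foldl_cons]
      have hg1 : PySem.List.pyGetD (u1 ++ (p :: t).map f) (u1.length : Int) 0 = f p := by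
        rw [PySem.List.pyGetD_natCast, List.map_cons]
        exact pv_getD_append_length u1 (f p) (t.map f) 0
      have hg2 : PySem.List.pyGetD (P1 ++ p :: t) (u1.length : Int) ([] : List (String × String)) = p := by
        rw [PySem.List.pyGetD_natCast, h]
        exact pv_getD_append_length P1 p t []
      rw [hg1, hg2]
      by_cases hfp : (f p == 1) = true
      · -- already used: skip
        rw [if_pos hfp]
        have hcond : (f p != 1 && pvMatches key p) = false := by simp [bne, hfp]
        have key := ih (P1 ++ [p]) (u1 ++ [f p]) (by simp [h]) acc
        simp only [List.append_assoc, List.singleton_append] at key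
        rw [List.map_cons, List.map_cons, List.filter_cons, hcond]
        simp only [Bool.false_eq_true, if_false]
        rw [show ((u1.length : Int) + 1) = (((u1 ++ [f p]).length : Nat) : Int) by simp]
        exact key
      · rw [if_neg hfp]
        have hfp' : (f p != 1) = true := by simp [bne, hfp]
        by_cases hm : PySem.Str.isIn key (pvTitleLower p) = true
        · -- fresh match: mark used, append the paper
          rw [if_pos hm]
          have hset : PySem.List.pySetD (u1 ++ (p :: t).map f) (u1.length : Int) 1
              = u1 ++ 1 :: t.map f := by
            rw [PySem.List.pySetD_natCast, List.map_cons]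
            exact pv_set_append_length u1 (f p) 1 (t.map f)
          rw [hset]
          have hcond : (f p != 1 && pvMatches key p) = true := by
            unfold pvMatches; rw [hm, hfp']; rfl
          have key := ih (P1 ++ [p]) (u1 ++ [1]) (by simp [h]) (acc ++ [p])
          simp only [List.append_assoc, List.singleton_append] at key
          rw [List.map_cons, List.map_cons, List.filter_cons, hcond]
          simp only [if_true]
          rw [show ((u1.length : Int) + 1) = (((u1 ++ [(1 : Int)]).length : Nat) : Int) by simp]
          exact key
        · -- no match: flags unchanged
          rw [if_neg hm]
          have hm' : PySem.Str.isIn key (pvTitleLower p) = false := Bool.eq_false_iff.mpr hm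
          have hcond : (f p != 1 && pvMatches key p) = false := by
            unfold pvMatches; rw [hm']; simp
          have key := ih (P1 ++ [p]) (u1 ++ [f p]) (by simp [h]) acc
          simp only [List.append_assoc, List.singleton_append] at key
          rw [List.map_cons, List.map_cons, List.filter_cons, hcond]
          simp only [Bool.false_eq_true, if_false]
          rw [show ((u1.length : Int) + 1) = (((u1 ++ [f p]).length : Nat) : Int) by simp]
          exact key

-- A's outer loop over keywords, with flags the indicator of a used-predicate
theorem pv_outerA (papers : List (List (String × String))) :
    ∀ (ks : List String) (u : List (String × String) → Bool)
      (acc : List (List (String × String))),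
    ks.foldl (fun st key => pvInnerA papers key st)
        (papers.map (fun p => if u p then (1 : Int) else 0), acc)
      = (papers.map (fun p => if u p || ks.any (fun k => pvMatches k p) then (1 : Int) else 0),
         acc ++ pvSel papers ks u) := by
  intro ks
  induction ks with
  | nil => intro u acc; simp [pvSel]
  | cons k ks ih =>
      intro u acc
      rw [List.foldl_cons]
      have step := pv_innerA_go k papers (fun p => if u p then (1 : Int) else 0) [] [] rfl acc
      simp only [List.nil_append, List.length_nil, Nat.cast_zero] at step
      have hA : pvInnerA papers k (papers.map (fun p => if u p then (1 : Int) else 0), acc)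
          = (papers.map (fun p =>
                if ((if u p then (1 : Int) else 0) != 1 && pvMatches k p) = true then (1 : Int)
                else if u p then 1 else 0),
             acc ++ papers.filter (fun p =>
                ((if u p then (1 : Int) else 0) != 1 && pvMatches k p))) := by
        unfold pvInnerA; exact step
      rw [hA]
      have hmap : (fun p : List (String × String) =>
            if ((if u p then (1 : Int) else 0) != 1 && pvMatches k p) = true then (1 : Int)
            else if u p then 1 else 0)
          = (fun p => if (u p || pvMatches k p) = true then (1 : Int) else 0) := by
        funext p; cases u p <;> cases pvMatches k p <;> simp [bne]
      have hfil : (fun p : List (String × String) =>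
            ((if u p then (1 : Int) else 0) != 1 && pvMatches k p))
          = (fun p => (!u p && pvMatches k p)) := by
        funext p; cases u p <;> simp [bne]
      rw [hmap, hfil, ih (fun p => u p || pvMatches k p)
        (acc ++ papers.filter (fun p => !u p && pvMatches k p))]
      simp only [pvSel, List.any_cons, Bool.or_assoc, List.append_assoc]
      rfl

-- the first-match index only moves forward
theorem pv_firstMatch_ge (t : String) :
    ∀ (ks : List String) (j r : Int), pvFirstMatch t ks j = some r → j ≤ r := by
  intro ks
  induction ks with
  | nil => intro j r h; simp [pvFirstMatch] at h
  | cons k ks ih =>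
      intro j r h
      by_cases hm : PySem.Str.isIn k t = true
      · simp only [pvFirstMatch, hm, if_true, Option.some.injEq] at h; omega
      · simp only [pvFirstMatch, hm, if_false, Bool.false_eq_true] at h
        have := ih (j + 1) r h
        omega

-- keyword-major selection = concatenation of the first-match buckets
theorem pv_sel_eq_buckets (papers : List (List (String × String))) :
    ∀ (ks : List String) (u : List (String × String) → Bool) (j0 : Int),
    pvSel papers ks u
      = (List.range ks.length).flatMap (fun (j : ℕ) =>
          papers.filter (fun p =>
            !u p && (pvFirstMatch (pvTitleLower p) ks j0 == some (j0 + (j : Int))))) := by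
  intro ks
  induction ks with
  | nil => intro u j0; simp [pvSel]
  | cons k ks ih =>
      intro u j0
      simp only [pvSel, List.length_cons, List.range_succ_eq_map, List.flatMap_cons,
        List.flatMap_map]
      congr 1
      · -- bucket 0 = the papers whose first matching keyword is k
        apply List.filter_congr
        intro p _
        simp only [Nat.cast_zero, add_zero]
        by_cases hm : PySem.Str.isIn k (pvTitleLower p) = true
        · rw [show pvFirstMatch (pvTitleLower p) (k :: ks) j0 = some j0 from by
            simp only [pvFirstMatch, hm, if_true]]
          unfold pvMatches; rw [hm]; try simp
        · rw [show pvFirstMatch (pvTitleLower p) (k :: ks) j0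
              = pvFirstMatch (pvTitleLower p) ks (j0 + 1) from by
            simp only [pvFirstMatch, hm, Bool.false_eq_true, if_false]]
          have hfalse : (pvFirstMatch (pvTitleLower p) ks (j0 + 1) == some j0) = false := by
            cases hf : pvFirstMatch (pvTitleLower p) ks (j0 + 1) with
            | none => rfl
            | some r =>
                have := pv_firstMatch_ge (pvTitleLower p) ks (j0 + 1) r hf
                have hne : r ≠ j0 := by omega
                simp [hne]
          rw [hfalse]
          unfold pvMatches; rw [Bool.eq_false_iff.mpr hm]; try simp
      · -- buckets 1.. = the buckets of the remaining keywords, shifted by one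
        rw [ih (fun p => u p || pvMatches k p) (j0 + 1)]
        congr 1
        funext j
        apply List.filter_congr
        intro p _
        have hcast : j0 + ((j + 1 : ℕ) : ℤ) = (j0 + 1) + (j : ℤ) := by push_cast; omega
        by_cases hm : PySem.Str.isIn k (pvTitleLower p) = true
        · rw [show pvFirstMatch (pvTitleLower p) (k :: ks) j0 = some j0 from by
            simp only [pvFirstMatch, hm, if_true]]
          have h1 : (some j0 == some (j0 + ((j + 1 : ℕ) : ℤ))) = false := by
            simp; omega
          rw [h1]
          unfold pvMatches; rw [hm]; try simp
        · rw [show pvFirstMatch (pvTitleLower p) (k :: ks) j0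
              = pvFirstMatch (pvTitleLower p) ks (j0 + 1) from by
            simp only [pvFirstMatch, hm, Bool.false_eq_true, if_false]]
          rw [hcast]
          unfold pvMatches; rw [Bool.eq_false_iff.mpr hm]; try simp

-- B's first loop builds the (priority, paper) pairs in order
theorem pv_keyed_eq (papers : List (List (String × String))) :
    ∀ (acc : List (Int × List (String × String))),
    papers.foldl (fun keyed paper =>
        match pvFirstMatch (pvTitleLower paper) pvKeywords 0 with
        | some j => keyed ++ [(j, paper)]
        | none => keyed) acc
      = acc ++ papers.filterMap (fun p =>
          (pvFirstMatch (pvTitleLower p) pvKeywords 0).map (fun j => (j, p))) := by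
  intro acc
  induction papers generalizing acc with
  | nil => simp
  | cons p ps ih =>
      cases h : pvFirstMatch (pvTitleLower p) pvKeywords 0 with
      | none => simp [h, ih]
      | some j => simp [h, ih]

-- selecting one bucket out of the keyed list
theorem pv_keyed_filter (papers : List (List (String × String))) (v : Int) :
    (papers.filterMap (fun p =>
        (pvFirstMatch (pvTitleLower p) pvKeywords 0).map (fun j => (j, p)))).filter
        (fun jp => jp.1 == v)
      = (papers.filter (fun p => pvFirstMatch (pvTitleLower p) pvKeywords 0 == some v)).map
          (fun p => (v, p)) := by
  induction papers with
  | nil => rfl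
  | cons p ps ih =>
      cases h : pvFirstMatch (pvTitleLower p) pvKeywords 0 with
      | none => simp [h, ih]
      | some j =>
          by_cases hv : j = v
          · subst hv; simp [h, ih]
          · simp [h, ih, hv]

-- a string-append loop is the fold of the rendered pieces
theorem pv_foldl_str_append {α : Type} (l : List α) (g : α → String) (a : String) :
    l.foldl (fun c x => c ++ g x) a = (l.map g).foldl (· ++ ·) a := by
  rw [List.foldl_map]

-- folding group-by-group is folding the concatenation
theorem pv_foldl_flat {γ : Type} (gs : List γ) (L : γ → List String) :
    ∀ (c : String),
    gs.foldl (fun c g => (L g).foldl (· ++ ·) c) c = (gs.flatMap L).foldl (· ++ ·) c := by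
  induction gs with
  | nil => intro c; simp
  | cons g gs ih => intro c; simp [List.foldl_append, ih]

-- A's per-paper rendering equals B's single format string
theorem pv_render_eq (p : List (String × String)) :
    ("<h3><a href=\"" ++ (pvDGet p "href").getD "" ++ "\" target=\"_blank\">"
        ++ (pvDGet p "title").getD "" ++ "</a></h3>"
      ++ ("<p><b>" ++ (pvDGet p "authors").getD "" ++ "</b></p>")
      ++ ("<p>Category: <b>" ++ (pvDGet p "ConOrJouName").getD "" ++ "</b></p>"))
      ++ "<br/>" = pvRender p := by
  unfold pvRender
  simp only [String.append_assoc]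
  rw [← String.append_assoc (s₁ := "</a></h3>") (s₂ := "<p><b>"),
    show ("</a></h3>" : String) ++ "<p><b>" = "</a></h3><p><b>" from by decide,
    ← String.append_assoc (s₁ := "</b></p>") (s₂ := "<p>Category: <b>"),
    show ("</b></p>" : String) ++ "<p>Category: <b>" = "</b></p><p>Category: <b>" from by decide,
    show ("</b></p>" : String) ++ "<br/>" = "</b></p><br/>" from by decide]

-- the two programs agree on every input (Pre_ is only about where Python A raises)
theorem pv_main (papers : List (List (String × String))) :
    generate_html_dblp papers = generate_html_dblp_alt papers := by
  unfold generate_html_dblp generate_html_dblp_alt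
  have h0 : List.replicate papers.length (0 : Int)
      = papers.map (fun p => if (fun _ : List (String × String) => false) p then (1 : Int) else 0) := by
    simp
  rw [h0, pv_outerA papers pvKeywords (fun _ => false) [],
    pv_sel_eq_buckets papers pvKeywords (fun _ => false) 0,
    pv_keyed_eq papers []]
  simp only [List.nil_append, Bool.not_false, Bool.true_and, zero_add]
  congr 2
  -- A side: one fold over the rendered buckets
  rw [pv_foldl_str_append]
  rw [show (fun paper => "<h3><a href=\"" ++ (pvDGet paper "href").getD "" ++ "\" target=\"_blank\">"
        ++ (pvDGet paper "title").getD "" ++ "</a></h3>"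
        ++ ("<p><b>" ++ (pvDGet paper "authors").getD "" ++ "</b></p>")
        ++ ("<p>Category: <b>" ++ (pvDGet paper "ConOrJouName").getD "" ++ "</b></p>")
        ++ "<br/>") = pvRender from funext pv_render_eq]
  -- B side: filter each group, render, and flatten
  simp only [PySem.List.foldl_if_eq_foldl_filter, pv_foldl_str_append, pv_foldl_flat]
  simp only [PySem.List.pyRange_one, Int.sub_zero, Int.toNat_natCast, List.flatMap_map, zero_add]
  simp only [pv_keyed_filter, List.map_map, Function.comp_def]
  rw [List.map_flatMap]

-- ===== VERDICT (by name: the statement is the Claim_ definition above) =====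
theorem generate_html_dblp_spec : Claim_equal_generate_html_dblp := by
  intro papers _ _
  exact pv_main papers
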